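-- pv_equiv track=rewrite | github.com/BeskrovnaiaM/biotool | modules/protein_tool.py | define_polarity
-- ===== SOURCE A (Python) =====
-- from typing import Dict, List, Union
--
-- POLAR_AA = {'D', 'E', 'R', 'K', 'H', 'N', 'Q', 'S', 'T', 'Y', 'C'}
--
-- def define_polarity(seq: str) -> Dict[str, int]:
--     polarity_count = {'Polar': 0, 'Nonpolar': 0}
--     for aminoacid in seq:
--         if aminoacid in POLAR_AA:
--             polarity_count['Polar'] += 1
--         else:
--             polarity_count['Nonpolar'] += 1
--     return polarity_count
-- ===== SOURCE B (Python) =====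
-- POLAR_AA = ('D', 'E', 'R', 'K', 'H', 'N', 'Q', 'S', 'T', 'Y', 'C')
--
-- def define_polarity(seq: str) -> dict:
--     polar = sum(seq.count(aa) for aa in POLAR_AA)
--     return {'Polar': polar, 'Nonpolar': len(seq) - polar}
-- ===== Notes on version B (the rewrite author's own statement) =====
-- stated objective: alternative
-- what changed: B never classifies characters: it iterates over the 11 polar amino-acid symbols and sums seq.count(aa) (one C-level scan of seq per symbol), then derives Nonpolar as len(seq) - polar; A makes one per-character pass with a set-membership test updating two dict counters.
import Mathlib
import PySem

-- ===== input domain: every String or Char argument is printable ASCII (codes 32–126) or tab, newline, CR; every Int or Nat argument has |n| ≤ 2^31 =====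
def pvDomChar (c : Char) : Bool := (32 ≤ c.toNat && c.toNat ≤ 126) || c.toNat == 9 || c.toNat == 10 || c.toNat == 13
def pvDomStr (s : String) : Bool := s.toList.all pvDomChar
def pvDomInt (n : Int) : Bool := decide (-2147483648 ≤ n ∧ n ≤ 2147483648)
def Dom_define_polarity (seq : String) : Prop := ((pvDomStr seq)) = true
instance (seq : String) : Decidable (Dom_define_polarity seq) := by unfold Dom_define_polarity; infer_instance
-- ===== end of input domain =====

-- B iterates over the 11 polar amino-acid symbols summing seq.count(aa) (one scan per symbol) and
-- derives Nonpolar as len(seq) - polar, instead of A's single per-character pass with a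
-- set-membership test updating two dict counters (objective: alternative).

def POLAR_AA : PySem.Set Char :=
  PySem.Set.ofList ['D', 'E', 'R', 'K', 'H', 'N', 'Q', 'S', 'T', 'Y', 'C']

-- ===== PORT A =====
def define_polarity (seq : String) : List (String × Int) :=
  let init : PySem.Dict String Int := (PySem.Dict.empty.insert "Polar" 0).insert "Nonpolar" 0
  let d := seq.toList.foldl (fun d aminoacid =>
    if POLAR_AA.contains aminoacid then
      d.modify "Polar" 0 (· + 1)
    else
      d.modify "Nonpolar" 0 (· + 1)) init
  d.items

-- ===== PORT B =====
-- B's POLAR_AA is the tuple ('D','E','R','K','H','N','Q','S','T','Y','C')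
def POLAR_AA_B : List Char := ['D', 'E', 'R', 'K', 'H', 'N', 'Q', 'S', 'T', 'Y', 'C']

def define_polarity_alt (seq : String) : List (String × Int) :=
  -- seq.count(aa) with a one-character pattern aa is exactly the character count in seq
  let polar : Int := (POLAR_AA_B.map (fun aa => (seq.toList.count aa : Int))).sum
  [("Polar", polar), ("Nonpolar", (seq.toList.length : Int) - polar)]

-- ===== PRECONDITION & SPEC =====
def Spec_define_polarity (seq : String) (out : List (String × Int)) : Prop := out = define_polarity_alt seq
instance (seq : String) (out : List (String × Int)) : Decidable (Spec_define_polarity seq out) := by unfold Spec_define_polarity; infer_instance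

-- ===== CLAIM (what is proved, stated in full; the proofs are below) =====
def Claim_equal_define_polarity : Prop := ∀ (seq : String), Dom_define_polarity seq → Spec_define_polarity seq (define_polarity seq)

-- ===== LEMMAS AND PROOFS =====

-- invariant of A's loop: starting from {Polar: p, Nonpolar: q}, the fold yields
-- {Polar: p + #polar, Nonpolar: q + (#total - #polar)}
theorem define_polarity_loop (l : List Char) (p q : Int) :
    l.foldl (fun d aminoacid =>
      if POLAR_AA.contains aminoacid then
        d.modify "Polar" 0 (· + 1)
      else
        d.modify "Nonpolar" 0 (· + 1))
      (PySem.Dict.mk [("Polar", p), ("Nonpolar", q)]) =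
    PySem.Dict.mk [("Polar", p + l.countP (fun c => POLAR_AA.contains c)),
                   ("Nonpolar", q + ((l.length : Int) - l.countP (fun c => POLAR_AA.contains c)))] := by
  induction l generalizing p q with
  | nil => simp
  | cons c t ih =>
    simp only [List.foldl_cons]
    by_cases h : POLAR_AA.contains c = true
    · rw [if_pos h]
      have hm : (PySem.Dict.mk [("Polar", p), ("Nonpolar", q)]).modify "Polar" 0 (· + 1) =
          PySem.Dict.mk [("Polar", p + 1), ("Nonpolar", q)] := by
        simp [PySem.Dict.modify, PySem.Dict.insert]
        rfl
      have hmem : c ∈ POLAR_AA := by simpa using h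
      rw [hm, ih]
      simp [hmem]
      ring_nf
    · rw [if_neg h]
      have hm : (PySem.Dict.mk [("Polar", p), ("Nonpolar", q)]).modify "Nonpolar" 0 (· + 1) =
          PySem.Dict.mk [("Polar", p), ("Nonpolar", q + 1)] := by
        simp [PySem.Dict.modify, PySem.Dict.insert]
        rfl
      have hmem : ¬ c ∈ POLAR_AA := by simpa using h
      rw [hm, ih]
      simp [hmem]
      ring_nf

-- disjoint split of a countP over a head symbol not occurring in the rest
theorem countP_head_split (l : List Char) (p : Char) (ps : List Char) (hp : p ∉ ps) :
    l.countP (fun x => (p :: ps).contains x) =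
      l.count p + l.countP (fun x => ps.contains x) := by
  induction l with
  | nil => simp
  | cons c t ih =>
    rw [List.countP_cons, List.countP_cons, List.count_cons, ih]
    by_cases hcp : c = p
    · subst hcp
      have ha : ((c :: ps).contains c) = true := by simp
      have hb : (c == c) = true := by simp
      have hnot : ps.contains c = false := by simpa using hp
      rw [ha, hb, hnot]
      simp only [if_true]
      have : (if false = true then 1 else 0) = 0 := rfl
      rw [this]
      omega
    · have h1 : ((p :: ps).contains c) = (ps.contains c) := by
        simp only [List.contains_eq_mem, List.mem_cons, decide_eq_decide]
        constructor
        · rintro (h | h); exact absurd h hcp; exact h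
        · exact Or.inr
      have h2 : (c == p) = false := by simpa using hcp
      rw [h1, h2]
      by_cases hin : ps.contains c = true <;> simp_all
      omega

-- B's per-symbol count-sum equals the per-character countP, for a duplicate-free symbol list
theorem sum_counts_eq_countP (l : List Char) (ps : List Char) (hps : ps.Nodup) :
    ((ps.map (fun aa => (l.count aa : Int))).sum) =
      (l.countP (fun x => ps.contains x) : Int) := by
  induction ps with
  | nil => simp
  | cons p t ih =>
    have hnd := List.nodup_cons.mp hps
    rw [List.map_cons, List.sum_cons, ih hnd.2, countP_head_split l p t hnd.1]
    push_cast; ring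

-- ===== VERDICT (by name: the statement is the Claim_ definition above) =====
theorem define_polarity_spec : Claim_equal_define_polarity := by
  intro seq _
  unfold Spec_define_polarity define_polarity define_polarity_alt
  have hinit : ((PySem.Dict.empty.insert "Polar" (0 : Int)).insert "Nonpolar" 0) =
      PySem.Dict.mk [("Polar", 0), ("Nonpolar", 0)] := by rfl
  have hnd : POLAR_AA_B.Nodup := by decide
  rw [sum_counts_eq_countP seq.toList POLAR_AA_B hnd]
  simp only [hinit, define_polarity_loop]
  have hpred : seq.toList.countP (fun c => POLAR_AA.contains c) =
      seq.toList.countP (fun x => POLAR_AA_B.contains x) := by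
    apply List.countP_congr
    intro c _
    simp [POLAR_AA, POLAR_AA_B, PySem.Set.mem_ofList]
  rw [hpred]
  simp
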